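-- pv_equiv track=rewrite | github.com/gmenikou/angio-audit | angio.py | parse_multi_search_terms
-- ===== SOURCE A (Python) =====
-- def parse_multi_search_terms(text):
--     if not text:
--         return []
--     normalized = text.replace("\n", ",").replace(";", ",")
--     parts = []
--     for chunk in normalized.split(","):
--         chunk = chunk.strip()
--         if not chunk:
--             continue
--         parts.extend([p.strip() for p in chunk.split() if p.strip()])
--
--     seen = set()
--     result = []
--     for p in parts:
--         p_low = p.lower()
--         if p_low not in seen:
--             seen.add(p_low)
--             result.append(p_low)
--     return result
-- ===== SOURCE B (Python) =====
-- def parse_multi_search_terms(text):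
--     # single character-level scan: a token accumulator flushed at separators,
--     # deduped in insertion order via a dict used as an ordered set
--     seen = {}
--     token = ""
--     for ch in text:
--         if ch in ",;\n" or ch.isspace():
--             if token and token not in seen:
--                 seen[token] = None
--             token = ""
--         else:
--             token += ch.lower()
--     if token and token not in seen:
--         seen[token] = None
--     return list(seen)
-- ===== Notes on version B (the rewrite author's own statement) =====
-- stated objective: alternative
-- what changed: B discards A's replace/split/strip/split pipeline entirely and performs a single character-level scan with a token accumulator flushed at each separator character, deduping tokens in insertion order via a dict used as an ordered set.
import Mathlib
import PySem

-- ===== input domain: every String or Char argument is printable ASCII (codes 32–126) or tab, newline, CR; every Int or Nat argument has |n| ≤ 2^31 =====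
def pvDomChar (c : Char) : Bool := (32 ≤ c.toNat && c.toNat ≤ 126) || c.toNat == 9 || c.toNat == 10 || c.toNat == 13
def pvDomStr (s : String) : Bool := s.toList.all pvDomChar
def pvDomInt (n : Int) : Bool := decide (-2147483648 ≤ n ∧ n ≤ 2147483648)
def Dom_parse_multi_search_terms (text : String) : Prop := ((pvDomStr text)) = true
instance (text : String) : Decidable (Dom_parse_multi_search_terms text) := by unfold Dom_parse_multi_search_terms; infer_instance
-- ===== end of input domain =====

-- B replaces A's replace/split/strip pipeline by a single character-level scan: one pass over the
-- characters with a token accumulator flushed at separators, deduping tokens in insertion order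
-- (objective: alternative — a different algorithm of the same cost).

-- ===== PORT A =====
-- helper: Python's s.split(sep) for the non-empty separator "," used below (PySem.Chars.splitOn
-- is exactly that; this Str-level wrapper mirrors PySem.Str.split₀'s construction)
def pvStrSplitOn (s sep : String) : List String :=
  (PySem.Chars.splitOn s.toList sep.toList).map String.ofList

def parse_multi_search_terms (text : String) : List String :=
  if text = "" then []
  else
    let normalized := PySem.Str.replace (PySem.Str.replace text "\n" ",") ";" ","
    let parts := (pvStrSplitOn normalized ",").foldl
      (fun parts chunk =>
        let chunk := PySem.Str.strip chunk
        if chunk = "" then parts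
        else parts ++ ((PySem.Str.split₀ chunk).filter
              (fun p => ¬(PySem.Str.strip p = ""))).map PySem.Str.strip)
      []
    (parts.foldl
      (fun st p =>
        let p_low := PySem.Str.lower p
        if PySem.Set.contains st.1 p_low then st
        else (PySem.Set.add st.1 p_low, st.2 ++ [p_low]))
      ((PySem.Set.empty : PySem.Set String), ([] : List String))).2

-- ===== PORT B =====
-- B's `seen` is a dict with only None values guarded by a membership test before every insert,
-- i.e. exactly its ordered key list: it is ported as that list (list(seen) = the list itself).
-- The flush `if token and token not in seen: seen[token] = None` appears twice in Source B (in the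
-- loop and after it) and is this helper; the token is a List Char built by appending, as Python
-- builds it by `token += ch.lower()`.
def pvFlushB (seen : List String) (tok : List Char) : List String :=
  if tok ≠ [] ∧ seen.contains (String.ofList tok) = false then seen ++ [String.ofList tok]
  else seen

def pvStepB (st : List String × List Char) (ch : Char) : List String × List Char :=
  if ch = ',' ∨ ch = ';' ∨ ch = '\n' ∨ PySem.Chars.isspace ch then (pvFlushB st.1 st.2, [])
  else (st.1, st.2 ++ [PySem.Chars.lowerChar ch])

def parse_multi_search_terms_alt (text : String) : List String :=
  let st := text.toList.foldl pvStepB ([], [])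
  pvFlushB st.1 st.2

-- ===== PRECONDITION & SPEC =====
def Spec_parse_multi_search_terms (text : String) (out : List String) : Prop := out = parse_multi_search_terms_alt text
instance (text : String) (out : List String) : Decidable (Spec_parse_multi_search_terms text out) := by unfold Spec_parse_multi_search_terms; infer_instance

-- ===== CLAIM (what is proved, stated in full; the proofs are below) =====
def Claim_equal_parse_multi_search_terms : Prop := ∀ (text : String), Dom_parse_multi_search_terms text → Spec_parse_multi_search_terms text (parse_multi_search_terms text)

-- ===== LEMMAS AND PROOFS =====

-- character substitution performed by a single-character str.replace
def pvSubst (a b c : Char) : Char := if c = a then b else c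

-- split at every character satisfying p, keeping empty pieces (the shape of Python's s.split(sep))
def pvSplitKeep (p : Char → Bool) : List Char → List (List Char)
  | [] => [[]]
  | c :: t => if p c then [] :: pvSplitKeep p t else (pvSplitKeep p t).modifyHead (c :: ·)

-- the whitespace tokens of a string (the value of Python's s.split())
def pvToks (s : List Char) : List (List Char) :=
  (pvSplitKeep PySem.Chars.isspace s).filter (· ≠ [])

-- A's delimiter normalisation / the translation of all of B's separators to spaces, per character
def pvSigmaA (c : Char) : Char := if c = '\n' ∨ c = ';' then ',' else c
def pvSigmaB (c : Char) : Char := if c = '\n' ∨ c = ';' ∨ c = ',' then ' ' else c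

-- B's scan, descriptively: split at B's separators, lowering the kept characters
def pvSplitLow : List Char → List (List Char)
  | [] => [[]]
  | c :: t =>
      if c = ',' ∨ c = ';' ∨ c = '\n' ∨ PySem.Chars.isspace c then [] :: pvSplitLow t
      else (pvSplitLow t).modifyHead (PySem.Chars.lowerChar c :: ·)

-- insertion-order dedup step (what pvFlushB does to a nonempty token)
def pvIns (seen : List String) (w : String) : List String :=
  if seen.contains w = false then seen ++ [w] else seen

theorem pvSplitKeep_ne_nil (p : Char → Bool) (s : List Char) : pvSplitKeep p s ≠ [] := by
  induction s with
  | nil => simp [pvSplitKeep]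
  | cons c t ih =>
    simp only [pvSplitKeep]
    split
    · simp
    · cases h : pvSplitKeep p t with
      | nil => exact absurd h ih
      | cons a l => simp [List.modifyHead]

theorem pvSplitLow_ne_nil (s : List Char) : pvSplitLow s ≠ [] := by
  induction s with
  | nil => simp [pvSplitLow]
  | cons c t ih =>
    simp only [pvSplitLow]
    split
    · simp
    · cases h : pvSplitLow t with
      | nil => exact absurd h ih
      | cons a l => simp [List.modifyHead]

theorem pv_modifyHead_id {α : Type} (l : List α) : List.modifyHead (fun x => x) l = l := by
  cases l <;> simp

theorem pv_modifyHead_append_left {α : Type} (f : List α → List α) (xs ys : List (List α))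
    (h : xs ≠ []) : List.modifyHead f (xs ++ ys) = List.modifyHead f xs ++ ys := by
  cases xs with
  | nil => exact absurd rfl h
  | cons a l => simp

theorem pv_replace_go (a b : Char) :
    ∀ (s : List Char) (fuel : Nat) (acc : List Char), s.length ≤ fuel →
      PySem.Chars.replace.go [a] [b] fuel s acc = acc.reverse ++ s.map (pvSubst a b) := by
  intro s
  induction s with
  | nil =>
    intro fuel acc h
    cases fuel <;> simp [PySem.Chars.replace.go]
  | cons c t ih =>
    intro fuel acc h
    cases fuel with
    | zero => simp at h
    | succ n =>
      simp only [PySem.Chars.replace.go]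
      by_cases hc : c = a
      · subst hc
        simp only [List.isPrefixOf, BEq.rfl, Bool.true_and, if_true, List.length_cons,
          List.length_nil, Nat.zero_add, List.drop_succ_cons, List.drop_zero]
        rw [ih n _ (Nat.le_of_succ_le_succ h)]
        simp [pvSubst]
      · have : [a].isPrefixOf (c :: t) = false := by
          simp [List.isPrefixOf]; exact fun h' => absurd h'.symm hc
        rw [this]
        simp only [Bool.false_eq_true, if_false]
        rw [ih n _ (Nat.le_of_succ_le_succ h)]
        simp [pvSubst, hc]

theorem pv_replace_single (a b : Char) (s : List Char) :
    PySem.Chars.replace s [a] [b] = s.map (pvSubst a b) := by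
  have h := pv_replace_go a b s s.length [] (Nat.le_refl _)
  simpa [PySem.Chars.replace] using h

theorem pv_splitOn_go (a : Char) :
    ∀ (fuel : Nat) (l cur : List Char) (acc : List (List Char)) (_ : l.length ≤ fuel),
      PySem.Chars.splitOn.go [a] fuel l cur acc =
        acc.reverse ++ (pvSplitKeep (· == a) l).modifyHead (cur.reverse ++ ·) := by
  intro fuel
  induction fuel with
  | zero =>
    intro l cur acc h
    have : l = [] := List.length_eq_zero_iff.mp (Nat.le_zero.mp h)
    subst this
    simp [PySem.Chars.splitOn.go, pvSplitKeep]
  | succ n ih =>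
    intro l cur acc h
    cases l with
    | nil => simp [PySem.Chars.splitOn.go, pvSplitKeep]
    | cons c rest =>
      simp only [PySem.Chars.splitOn.go]
      by_cases hc : c = a
      · subst hc
        simp only [List.isPrefixOf, BEq.rfl, Bool.true_and, if_true,
          List.length_cons, List.length_nil, Nat.zero_add, List.drop_succ_cons, List.drop_zero]
        rw [ih rest [] _ (Nat.le_of_succ_le_succ h)]
        have hmod : (pvSplitKeep (· == c) rest).modifyHead (List.reverse [] ++ ·)
            = pvSplitKeep (· == c) rest := by
          cases pvSplitKeep (· == c) rest <;> simp
        rw [hmod]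
        simp [pvSplitKeep]
      · have hpre : [a].isPrefixOf (c :: rest) = false := by
          simp [List.isPrefixOf]; exact fun h' => absurd h'.symm hc
        rw [hpre]
        simp only [Bool.false_eq_true, if_false]
        rw [ih rest (c :: cur) acc (Nat.le_of_succ_le_succ h)]
        have : ((· == a) c) = false := by simp [hc]
        simp only [pvSplitKeep, this, Bool.false_eq_true, if_false]
        cases hsk : pvSplitKeep (· == a) rest with
        | nil => exact absurd hsk (pvSplitKeep_ne_nil _ _)
        | cons hh tl => simp

theorem pv_splitOn_single (a : Char) (s : List Char) :
    PySem.Chars.splitOn s [a] = pvSplitKeep (· == a) s := by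
  rw [PySem.Chars.splitOn, pv_splitOn_go a (s.length + 1) s [] [] (Nat.le_succ _)]
  cases h : pvSplitKeep (· == a) s with
  | nil => exact absurd h (pvSplitKeep_ne_nil _ _)
  | cons hh tl => simp

theorem pv_split₀_go :
    ∀ (s cur : List Char) (acc : List (List Char)),
      PySem.Chars.split₀.go s cur acc =
        acc.reverse ++ ((pvSplitKeep PySem.Chars.isspace s).modifyHead (cur.reverse ++ ·)).filter (· ≠ []) := by
  intro s
  induction s with
  | nil =>
    intro cur acc
    simp only [PySem.Chars.split₀.go, pvSplitKeep, List.modifyHead, List.append_nil, List.filter]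
    by_cases h : cur = []
    · subst h; simp
    · have h1 : cur.isEmpty = false := by simpa [List.isEmpty_iff] using h
      have h2 : cur.reverse ≠ [] := by simpa using h
      simp [h1, h2]
  | cons c rest ih =>
    intro cur acc
    simp only [PySem.Chars.split₀.go]
    by_cases hc : PySem.Chars.isspace c = true
    · rw [hc]
      simp only [if_true, pvSplitKeep, hc]
      by_cases hcur : cur = []
      · subst hcur
        simp only [List.isEmpty_nil, if_true]
        rw [ih [] acc]
        simp [pv_modifyHead_id]
      · have h1 : cur.isEmpty = false := by simpa [List.isEmpty_iff] using hcur
        rw [h1]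
        simp only [Bool.false_eq_true, if_false]
        rw [ih [] (cur.reverse :: acc)]
        have h2 : cur.reverse ≠ [] := by simpa using hcur
        simp [h2, pv_modifyHead_id]
    · have hc' : PySem.Chars.isspace c = false := by simpa using hc
      rw [hc']
      simp only [Bool.false_eq_true, if_false, pvSplitKeep, hc']
      rw [ih (c :: cur) acc]
      cases hsk : pvSplitKeep PySem.Chars.isspace rest with
      | nil => exact absurd hsk (pvSplitKeep_ne_nil _ _)
      | cons hh tl => simp

theorem pv_split₀_eq (s : List Char) :
    PySem.Chars.split₀ s = pvToks s := by
  rw [PySem.Chars.split₀, pv_split₀_go s [] []]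
  cases h : pvSplitKeep PySem.Chars.isspace s with
  | nil => exact absurd h (pvSplitKeep_ne_nil _ _)
  | cons hh tl => simp [pvToks, h]

theorem pv_allspace_splitKeep (w : List Char) (hw : ∀ c ∈ w, PySem.Chars.isspace c = true) :
    pvSplitKeep PySem.Chars.isspace w = List.replicate (w.length + 1) [] := by
  induction w with
  | nil => simp [pvSplitKeep]
  | cons c t ih =>
    have hc := hw c (by simp)
    simp only [pvSplitKeep, hc, if_true, List.length_cons]
    rw [ih (fun c hc => hw c (by simp [hc]))]
    simp [List.replicate_succ]

theorem pv_splitKeep_append_space (s w : List Char) (hw : ∀ c ∈ w, PySem.Chars.isspace c = true) :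
    pvSplitKeep PySem.Chars.isspace (s ++ w)
      = pvSplitKeep PySem.Chars.isspace s ++ List.replicate w.length [] := by
  induction s with
  | nil =>
    rw [List.nil_append, pv_allspace_splitKeep w hw]
    simp [pvSplitKeep, List.replicate_succ]
  | cons c t ih =>
    simp only [List.cons_append, pvSplitKeep]
    by_cases hc : PySem.Chars.isspace c = true
    · rw [hc]; simp only [if_true]; rw [ih]; simp
    · have hc' : PySem.Chars.isspace c = false := by simpa using hc
      rw [hc']
      simp only [Bool.false_eq_true, if_false]
      rw [ih, pv_modifyHead_append_left _ _ _ (pvSplitKeep_ne_nil _ _)]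

theorem pv_toks_append_space (s w : List Char) (hw : ∀ c ∈ w, PySem.Chars.isspace c = true) :
    pvToks (s ++ w) = pvToks s := by
  unfold pvToks
  rw [pv_splitKeep_append_space s w hw, List.filter_append]
  simp

theorem pv_toks_lstrip (s : List Char) : pvToks (PySem.Chars.lstrip s) = pvToks s := by
  rw [PySem.Chars.lstrip]
  induction s with
  | nil => simp
  | cons c t ih =>
    by_cases hc : PySem.Chars.isspace c = true
    · rw [List.dropWhile_cons_of_pos (by simpa using hc)]
      rw [ih]
      simp [pvToks, pvSplitKeep, hc]
    · rw [List.dropWhile_cons_of_neg (by simpa using hc)]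

theorem pv_toks_strip (s : List Char) : pvToks (PySem.Chars.strip s) = pvToks s := by
  rw [PySem.Chars.strip]
  have hr : ∀ x : List Char, pvToks (PySem.Chars.rstrip x) = pvToks x := by
    intro x
    rw [PySem.Chars.rstrip]
    have hx : x = (List.dropWhile PySem.Chars.isspace x.reverse).reverse
        ++ (List.takeWhile PySem.Chars.isspace x.reverse).reverse := by
      rw [← List.reverse_append, List.takeWhile_append_dropWhile, List.reverse_reverse]
    conv_rhs => rw [hx]
    rw [pv_toks_append_space]
    intro c hc
    exact List.mem_takeWhile_imp (List.mem_reverse.mp hc)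
  rw [hr, pv_toks_lstrip]

theorem pv_strip_eq_nil_toks (s : List Char) (h : PySem.Chars.strip s = []) : pvToks s = [] := by
  rw [← pv_toks_strip, h]
  simp [pvToks, pvSplitKeep]

theorem pv_pieces_no_p (p : Char → Bool) (s : List Char) :
    ∀ q ∈ pvSplitKeep p s, ∀ c ∈ q, p c = false := by
  induction s with
  | nil => intro q hq; simp [pvSplitKeep] at hq; subst hq; simp
  | cons c t ih =>
    intro q hq
    simp only [pvSplitKeep] at hq
    by_cases hc : p c = true
    · rw [hc] at hq
      simp only [if_true, List.mem_cons] at hq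
      rcases hq with h | h
      · subst h; simp
      · exact ih q h
    · have hc' : p c = false := by simpa using hc
      rw [hc'] at hq
      simp only [Bool.false_eq_true, if_false] at hq
      cases hsk : pvSplitKeep p t with
      | nil => exact absurd hsk (pvSplitKeep_ne_nil _ _)
      | cons hh tl =>
        rw [hsk] at hq
        simp only [List.modifyHead, List.mem_cons] at hq
        rcases hq with h | h
        · subst h
          intro d hd
          rcases List.mem_cons.mp hd with h | h
          · subst h; exact hc'
          · exact ih hh (by rw [hsk]; simp) d h
        · exact ih q (by rw [hsk]; simp [h])

theorem pv_strip_of_nospace (q : List Char) (h : ∀ c ∈ q, PySem.Chars.isspace c = false) :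
    PySem.Chars.strip q = q := by
  rw [PySem.Chars.strip, PySem.Chars.lstrip]
  have hl : List.dropWhile PySem.Chars.isspace q = q := by
    cases q with
    | nil => simp
    | cons c t => rw [List.dropWhile_cons_of_neg (by simp [h c (by simp)])]
  rw [hl, PySem.Chars.rstrip]
  have hr : List.dropWhile PySem.Chars.isspace q.reverse = q.reverse := by
    cases hq : q.reverse with
    | nil => simp
    | cons c t =>
      rw [List.dropWhile_cons_of_neg]
      simp [h c (by rw [← List.mem_reverse, hq]; simp)]
  rw [hr, List.reverse_reverse]

theorem pv_filter_flatMap {α : Type} (p : α → Bool) (f : List Char → List α) (l : List (List Char)) :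
    (l.flatMap f).filter p = l.flatMap (fun x => (f x).filter p) := by
  induction l with
  | nil => simp
  | cons a t ih => simp [List.flatMap_cons, List.filter_append, ih]

-- the chunk lemma: the whitespace-split of the space-translated text is the concatenation of the
-- whitespace-splits of the comma-chunks of the comma-normalised text
theorem pv_chunks (s : List Char) :
    pvSplitKeep PySem.Chars.isspace (s.map pvSigmaB)
      = (pvSplitKeep (· == ',') (s.map pvSigmaA)).flatMap (pvSplitKeep PySem.Chars.isspace) := by
  induction s with
  | nil => simp [pvSplitKeep]
  | cons c t ih =>
    simp only [List.map_cons]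
    by_cases h1 : c = '\n' ∨ c = ';' ∨ c = ','
    · have hA : pvSigmaA c = ',' := by
        rcases h1 with h | h | h <;> simp [pvSigmaA, h]
      have hB : pvSigmaB c = ' ' := by simp [pvSigmaB, h1]
      rw [hA, hB]
      simp only [pvSplitKeep, show PySem.Chars.isspace ' ' = true from by decide,
        show (',' == ',') = true from by decide, if_true, List.flatMap_cons]
      rw [ih]
      simp
    · have hA : pvSigmaA c = c := by
        simp only [pvSigmaA]; rw [if_neg]; tauto
      have hB : pvSigmaB c = c := by simp [pvSigmaB, h1]
      have hcc : (c == ',') = false := by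
        simp only [beq_eq_false_iff_ne, ne_eq]; tauto
      rw [hA, hB]
      by_cases hsp : PySem.Chars.isspace c = true
      · simp only [pvSplitKeep, hsp, hcc, if_true, Bool.false_eq_true, if_false]
        cases hK : pvSplitKeep (· == ',') (t.map pvSigmaA) with
        | nil => exact absurd hK (pvSplitKeep_ne_nil _ _)
        | cons H TL =>
          rw [hK] at ih
          simp only [List.modifyHead, List.flatMap_cons, pvSplitKeep, hsp, if_true]
          rw [ih]
          simp [List.flatMap_cons]
      · have hsp' : PySem.Chars.isspace c = false := by simpa using hsp
        simp only [pvSplitKeep, hsp', hcc, Bool.false_eq_true, if_false]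
        cases hK : pvSplitKeep (· == ',') (t.map pvSigmaA) with
        | nil => exact absurd hK (pvSplitKeep_ne_nil _ _)
        | cons H TL =>
          rw [hK] at ih
          rw [ih, List.flatMap_cons,
            pv_modifyHead_append_left _ _ _ (pvSplitKeep_ne_nil PySem.Chars.isspace H)]
          simp [List.flatMap_cons, pvSplitKeep, hsp']

theorem pv_foldl_ite_append {α β : Type} (P : α → Prop) [DecidablePred P] (g : α → List β) :
    ∀ (l : List α) (acc : List β),
      l.foldl (fun acc x => if P x then acc else acc ++ g x) acc
        = acc ++ l.flatMap (fun x => if P x then [] else g x) := by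
  intro l
  induction l with
  | nil => intro acc; simp
  | cons a t ih =>
    intro acc
    simp only [List.foldl_cons, List.flatMap_cons]
    by_cases h : P a
    · rw [if_pos h, if_pos h, ih]; simp
    · rw [if_neg h, if_neg h, ih]; simp

theorem pv_ofList_append_singleton {α : Type} [BEq α] (l : List α) (x : α) :
    PySem.Set.ofList (l ++ [x]) = PySem.Set.add (PySem.Set.ofList l) x := by
  simp [PySem.Set.ofList, List.foldl_append]

theorem pv_fold_dedup (f : String → String) :
    ∀ (ps l : List String),
      ps.foldl
        (fun st p =>
          let p_low := f p
          if PySem.Set.contains st.1 p_low then st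
          else (PySem.Set.add st.1 p_low, st.2 ++ [p_low]))
        (PySem.Set.ofList l, PySem.Set.ofList l)
        = (PySem.Set.ofList (l ++ ps.map f), PySem.Set.ofList (l ++ ps.map f)) := by
  intro ps
  induction ps with
  | nil => intro l; simp
  | cons p t ih =>
    intro l
    simp only [List.foldl_cons]
    have hstep :
        (let p_low := f p
          if PySem.Set.contains (PySem.Set.ofList l) p_low then
            (PySem.Set.ofList l, PySem.Set.ofList l)
          else (PySem.Set.add (PySem.Set.ofList l) p_low, PySem.Set.ofList l ++ [f p]))
          = (PySem.Set.ofList (l ++ [f p]), PySem.Set.ofList (l ++ [f p])) := by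
      rw [pv_ofList_append_singleton]
      by_cases h : PySem.Set.contains (PySem.Set.ofList l) (f p) = true
      · simp only [h, if_true]
        rw [PySem.Set.add, if_pos h]
      · have h' : PySem.Set.contains (PySem.Set.ofList l) (f p) = false := by simpa using h
        simp only [h', Bool.false_eq_true, if_false]
        rw [PySem.Set.add, if_neg (by simpa using h')]
    rw [hstep, ih (l ++ [f p])]
    simp

-- per-character composition of A's two replaces
theorem pv_sigmaA_pt (c : Char) : pvSubst ';' ',' (pvSubst '\n' ',' c) = pvSigmaA c := by
  by_cases h1 : c = '\n'
  · subst h1; decide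
  · by_cases h2 : c = ';'
    · subst h2; decide
    · simp [pvSubst, pvSigmaA, h1, h2]

-- A's per-chunk computation, on the character level, is exactly the chunk's whitespace tokens
theorem pv_chunk_body (ch : List Char) :
    List.map String.toList
      (if PySem.Str.strip (String.ofList ch) = "" then []
       else ((PySem.Str.split₀ (PySem.Str.strip (String.ofList ch))).filter
            (fun p => ¬(PySem.Str.strip p = ""))).map PySem.Str.strip)
      = pvToks ch := by
  have htl : (PySem.Str.strip (String.ofList ch)).toList = PySem.Chars.strip ch := by
    rw [PySem.Str.toList_strip]; simp
  by_cases hs : PySem.Chars.strip ch = []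
  · have : PySem.Str.strip (String.ofList ch) = "" := by
      rw [← String.toList_inj, htl, hs]; rfl
    rw [if_pos this, pv_strip_eq_nil_toks ch hs]
    rfl
  · have hne : ¬(PySem.Str.strip (String.ofList ch) = "") := by
      intro h; rw [← String.toList_inj, htl] at h; exact hs h
    rw [if_neg hne]
    have hsplit : PySem.Str.split₀ (PySem.Str.strip (String.ofList ch))
        = (pvToks ch).map String.ofList := by
      rw [PySem.Str.split₀, htl, pv_split₀_eq, pv_toks_strip]
    rw [hsplit]
    have hpiece : ∀ q ∈ pvToks ch, PySem.Chars.strip q = q ∧ q ≠ [] := by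
      intro q hq
      have hq' : q ∈ (pvSplitKeep PySem.Chars.isspace ch).filter (· ≠ []) := by
        simpa [pvToks] using hq
      have hmem := List.mem_filter.mp hq'
      have hne' : q ≠ [] := by simpa using hmem.2
      exact ⟨pv_strip_of_nospace q (pv_pieces_no_p _ ch q hmem.1), hne'⟩
    have hstripof : ∀ q ∈ pvToks ch, PySem.Str.strip (String.ofList q) = String.ofList q := by
      intro q hq
      rw [← String.toList_inj, PySem.Str.toList_strip]
      simp [(hpiece q hq).1]
    have hfil : ((pvToks ch).map String.ofList).filter (fun p => ¬(PySem.Str.strip p = ""))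
        = (pvToks ch).map String.ofList := by
      rw [List.filter_eq_self]
      intro p hp
      rcases List.mem_map.mp hp with ⟨q, hq, rfl⟩
      have h1 := hstripof q hq
      have h2 : String.ofList q ≠ "" := by
        intro h
        have := congrArg String.toList h
        simp at this
        exact (hpiece q hq).2 this
      simp [h1, h2]
    rw [hfil, List.map_map, List.map_map]
    have hpt : ∀ q ∈ pvToks ch,
        ((String.toList ∘ PySem.Str.strip) ∘ String.ofList) q = (fun x => x) q := by
      intro q hq
      simp [Function.comp, hstripof q hq]
    rw [List.map_congr_left hpt]
    simp

-- ===== B-side lemmas: the scanner computes an insertion-order dedup of pvSplitLow's tokens =====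

theorem pv_flush_eq (seen : List String) (tok : List Char) :
    pvFlushB seen tok = if tok = [] then seen else pvIns seen (String.ofList tok) := by
  by_cases h : tok = []
  · subst h; simp [pvFlushB]
  · rw [if_neg h]
    unfold pvFlushB pvIns
    by_cases hc : seen.contains (String.ofList tok) = false
    · rw [if_pos ⟨h, hc⟩, if_pos hc]
    · rw [if_neg (fun hh => hc hh.2), if_neg hc]

theorem pv_scan (s : List Char) :
    ∀ (seen : List String) (tok : List Char),
      pvFlushB (s.foldl pvStepB (seen, tok)).1 (s.foldl pvStepB (seen, tok)).2
        = List.foldl pvIns seen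
            ((((pvSplitLow s).modifyHead (tok ++ ·)).filter (· ≠ [])).map String.ofList) := by
  induction s with
  | nil =>
    intro seen tok
    simp only [List.foldl_nil, pvSplitLow, List.modifyHead, List.append_nil]
    rw [pv_flush_eq]
    by_cases h : tok = []
    · subst h; simp
    · rw [if_neg h]
      simp [List.filter, h]
  | cons c t ih =>
    intro seen tok
    simp only [List.foldl_cons, pvStepB, pvSplitLow]
    by_cases hsep : c = ',' ∨ c = ';' ∨ c = '\n' ∨ PySem.Chars.isspace c
    · rw [if_pos hsep, if_pos hsep]
      rw [ih (pvFlushB seen tok) []]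
      have hid : (pvSplitLow t).modifyHead (([] : List Char) ++ ·) = pvSplitLow t := by
        simp only [List.nil_append]
        exact pv_modifyHead_id _
      rw [hid]
      have hrhs : ((([] :: pvSplitLow t).modifyHead (tok ++ ·)).filter (· ≠ [])).map String.ofList
          = (if tok = [] then [] else [String.ofList tok])
              ++ ((pvSplitLow t).filter (· ≠ [])).map String.ofList := by
        simp only [List.modifyHead, List.append_nil, List.filter]
        by_cases h : tok = []
        · subst h; simp
        · have : (decide ¬tok = []) = true := by simpa using h
          simp [h]
      rw [hrhs, List.foldl_append]
      congr 1
      rw [pv_flush_eq]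
      by_cases h : tok = []
      · subst h; simp
      · rw [if_neg h]; simp [h]
    · rw [if_neg hsep, if_neg hsep]
      rw [ih seen (tok ++ [PySem.Chars.lowerChar c])]
      congr 2
      cases hK : pvSplitLow t with
      | nil => exact absurd hK (pvSplitLow_ne_nil _)
      | cons h tl => simp

-- pvSplitLow is the isspace-split of the σB-translated string with its kept characters lowered
theorem pv_splitLow_eq (s : List Char) :
    pvSplitLow s
      = (pvSplitKeep PySem.Chars.isspace (s.map pvSigmaB)).map (List.map PySem.Chars.lowerChar) := by
  induction s with
  | nil => simp [pvSplitLow, pvSplitKeep]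
  | cons c t ih =>
    simp only [List.map_cons, pvSplitLow, pvSplitKeep]
    by_cases hsep : c = ',' ∨ c = ';' ∨ c = '\n' ∨ PySem.Chars.isspace c
    · have hsp : PySem.Chars.isspace (pvSigmaB c) = true := by
        rcases hsep with h | h | h | h
        · subst h; decide
        · subst h; decide
        · subst h; decide
        · by_cases hd : c = '\n' ∨ c = ';' ∨ c = ','
          · simp only [pvSigmaB, if_pos hd]; decide
          · simp only [pvSigmaB, if_neg hd]; exact h
      rw [if_pos hsep, hsp]
      simp only [if_true, List.map_cons, List.map_nil]
      rw [ih]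
    · have hB : pvSigmaB c = c := by
        simp only [pvSigmaB]
        rw [if_neg]
        intro h
        rcases h with h | h | h
        · exact hsep (Or.inr (Or.inr (Or.inl h)))
        · exact hsep (Or.inr (Or.inl h))
        · exact hsep (Or.inl h)
      have hsp : PySem.Chars.isspace c = false := by
        by_contra h
        exact hsep (Or.inr (Or.inr (Or.inr (by simpa using h))))
      rw [if_neg hsep, hB, hsp]
      simp only [Bool.false_eq_true, if_false]
      rw [ih]
      cases hK : pvSplitKeep PySem.Chars.isspace (t.map pvSigmaB) with
      | nil => exact absurd hK (pvSplitKeep_ne_nil _ _)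
      | cons h tl => simp

theorem pv_filter_map_lower (K : List (List Char)) :
    (K.map (List.map PySem.Chars.lowerChar)).filter (· ≠ [])
      = (K.filter (· ≠ [])).map (List.map PySem.Chars.lowerChar) := by
  rw [List.filter_map]
  congr 1
  apply List.filter_congr
  intro q _
  simp [Function.comp]

theorem pv_ins_eq_add : pvIns = (PySem.Set.add : List String → String → List String) := by
  funext seen w
  unfold pvIns PySem.Set.add
  by_cases h : PySem.Set.contains seen w = true
  · rw [if_pos h]
    rw [if_neg (by simp [PySem.Set.contains] at h; simp [h])]
  · rw [if_neg h]
    rw [if_pos (by simpa [PySem.Set.contains] using h)]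

-- ===== VERDICT (by name: the statement is the Claim_ definition above) =====
set_option maxHeartbeats 1000000 in
theorem parse_multi_search_terms_spec : Claim_equal_parse_multi_search_terms := by
  intro text _
  unfold Spec_parse_multi_search_terms
  by_cases h0 : text = ""
  · subst h0; decide
  · -- the common token list: the whitespace tokens of the σB-translated text, lowered
    have hA : (PySem.Str.replace (PySem.Str.replace text "\n" ",") ";" ",").toList
        = text.toList.map pvSigmaA := by
      rw [PySem.Str.toList_replace, PySem.Str.toList_replace]
      have e1 : ("\n".toList) = ['\n'] := by decide
      have e2 : ((";" : String).toList) = [';'] := by decide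
      have e3 : (("," : String).toList) = [','] := by decide
      rw [e1, e2, e3, pv_replace_single, pv_replace_single, List.map_map]
      exact List.map_congr_left (fun c _ => pv_sigmaA_pt c)
    -- A's parts list is the token list of the σB-translated text
    have hparts :
        ((pvStrSplitOn (PySem.Str.replace (PySem.Str.replace text "\n" ",") ";" ",") ",").foldl
          (fun parts chunk =>
            if PySem.Str.strip chunk = "" then parts
            else parts ++ ((PySem.Str.split₀ (PySem.Str.strip chunk)).filter
                  (fun p => ¬(PySem.Str.strip p = ""))).map PySem.Str.strip)
          [])
        = (pvToks (text.toList.map pvSigmaB)).map String.ofList := by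
      apply List.map_injective_iff.mpr (fun a b hab => String.toList_inj.mp hab)
      rw [pv_foldl_ite_append (fun chunk => PySem.Str.strip chunk = "")
        (fun chunk => ((PySem.Str.split₀ (PySem.Str.strip chunk)).filter
            (fun p => ¬(PySem.Str.strip p = ""))).map PySem.Str.strip)]
      rw [List.nil_append, List.map_flatMap]
      unfold pvStrSplitOn
      have e3 : (("," : String).toList) = [','] := by decide
      rw [e3, hA, pv_splitOn_single, List.flatMap_map]
      have hfuns : (fun a => List.map String.toList
          (if PySem.Str.strip (String.ofList a) = "" then []
           else ((PySem.Str.split₀ (PySem.Str.strip (String.ofList a))).filter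
                (fun p => ¬(PySem.Str.strip p = ""))).map PySem.Str.strip))
          = pvToks := by
        funext ch
        exact pv_chunk_body ch
      rw [hfuns]
      have hRHS : List.map String.toList ((pvToks (text.toList.map pvSigmaB)).map String.ofList)
          = pvToks (text.toList.map pvSigmaB) := by
        rw [List.map_map]
        have hco : String.toList ∘ String.ofList = fun q : List Char => q :=
          funext fun q => by simp
        rw [hco, List.map_id']
      rw [hRHS]
      unfold pvToks
      rw [pv_chunks, pv_filter_flatMap]
    -- A's value
    have hAval : parse_multi_search_terms text
        = PySem.Set.ofList ((pvToks (text.toList.map pvSigmaB)).map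
            (fun q => String.ofList (PySem.Chars.lower q))) := by
      simp only [parse_multi_search_terms]
      rw [if_neg h0, hparts]
      have hinit : ((PySem.Set.empty : PySem.Set String), ([] : List String))
          = (PySem.Set.ofList [], PySem.Set.ofList []) := rfl
      rw [hinit, pv_fold_dedup PySem.Str.lower _ []]
      simp only [List.nil_append, List.map_map]
      apply congrArg PySem.Set.ofList
      apply List.map_congr_left
      intro q _
      show PySem.Str.lower (String.ofList q) = String.ofList (PySem.Chars.lower q)
      rw [← String.toList_inj, PySem.Str.toList_lower]
      simp
    -- B's value
    have hBval : parse_multi_search_terms_alt text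
        = List.foldl pvIns []
            (((pvSplitLow text.toList).filter (· ≠ [])).map String.ofList) := by
      have h1 : parse_multi_search_terms_alt text
          = pvFlushB (text.toList.foldl pvStepB ([], [])).1
              (text.toList.foldl pvStepB ([], [])).2 := rfl
      have hid : (pvSplitLow text.toList).modifyHead (([] : List Char) ++ ·)
          = pvSplitLow text.toList := by
        simp only [List.nil_append]
        exact pv_modifyHead_id _
      rw [h1, pv_scan text.toList [] [], hid]
    -- B's token list is the same list of strings
    have htok : ((pvSplitLow text.toList).filter (· ≠ [])).map String.ofList
        = (pvToks (text.toList.map pvSigmaB)).map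
            (fun q => String.ofList (PySem.Chars.lower q)) := by
      rw [pv_splitLow_eq, pv_filter_map_lower]
      unfold pvToks
      rw [List.map_map]
      apply List.map_congr_left
      intro q _
      rfl
    rw [hAval, hBval, htok, pv_ins_eq_add, ← PySem.Set.ofList_eq_foldl]
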